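-- pv_equiv track=rewrite | github.com/Yarin5656/devops-ai-portfolio | task-1-log-analyzer/log_parser.py | get_detected_indicators
-- ===== SOURCE A (Python) =====
-- from typing import List, Optional
--
-- ERROR_INDICATORS = [
--     "FATAL",
--     "Traceback",
--     "Exception",
--     "ERROR",
--     "permission denied",
--     "connection refused",
--     "timeout",
--     "module not found",
--     "no such file",
--     "failed",
--     "unreachable",
--     "refused",
--     "killed",
--     "segfault",
--     "oom",
-- ]
--
-- def get_detected_indicators(error_lines: List[tuple]) -> List[str]:
--     """
--     Return a deduplicated list of indicator keywords found in error lines.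
--
--     Args:
--         error_lines: List of (line_number, line_text) error matches.
--
--     Returns:
--         Unique indicator names found, in order of first appearance.
--     """
--     found = []
--     seen = set()
--     for _, text in error_lines:
--         lower = text.lower()
--         for indicator in ERROR_INDICATORS:
--             if indicator.lower() in lower and indicator not in seen:
--                 found.append(indicator)
--                 seen.add(indicator)
--     return found
-- ===== SOURCE B (Python) =====
-- ERROR_INDICATORS = [
--     "FATAL",
--     "Traceback",
--     "Exception",
--     "ERROR",
--     "permission denied",
--     "connection refused",
--     "timeout",
--     "module not found",
--     "no such file",
--     "failed",
--     "unreachable",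
--     "refused",
--     "killed",
--     "segfault",
--     "oom",
-- ]
--
-- def get_detected_indicators(error_lines):
--     # Phase 1: index each indicator by the position of the first line containing it.
--     first = {}
--     for idx, (_, text) in enumerate(error_lines):
--         low = text.lower()
--         for indicator in ERROR_INDICATORS:
--             if indicator not in first and indicator.lower() in low:
--                 first[indicator] = idx
--     # Phase 2: candidates in declared ERROR_INDICATORS order, stably reordered
--     # by first-appearance line index (ties keep ERROR_INDICATORS order).
--     found = [indicator for indicator in ERROR_INDICATORS if indicator in first]
--     return sorted(found, key=lambda indicator: first[indicator])
-- ===== Notes on version B (the rewrite author's own statement) =====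
-- stated objective: alternative
-- what changed: A accumulates indicators in first-appearance order during a single scan with a seen-set; B first builds a dict mapping each indicator to the index of the first error line containing it, then filters ERROR_INDICATORS by membership and stably sorts the candidates by that first-line index (ties keep ERROR_INDICATORS order).
import Mathlib
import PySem

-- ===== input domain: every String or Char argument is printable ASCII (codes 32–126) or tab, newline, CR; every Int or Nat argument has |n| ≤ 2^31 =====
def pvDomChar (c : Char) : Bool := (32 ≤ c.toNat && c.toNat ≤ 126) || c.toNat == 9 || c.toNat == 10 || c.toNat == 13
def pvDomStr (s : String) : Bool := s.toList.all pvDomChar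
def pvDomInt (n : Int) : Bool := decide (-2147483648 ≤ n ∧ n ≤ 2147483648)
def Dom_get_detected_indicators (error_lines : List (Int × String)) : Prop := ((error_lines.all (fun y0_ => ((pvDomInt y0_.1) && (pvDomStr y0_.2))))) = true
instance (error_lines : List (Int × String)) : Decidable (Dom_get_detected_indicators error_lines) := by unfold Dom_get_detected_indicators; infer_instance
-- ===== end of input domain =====

-- B replaces A's accumulate-in-first-appearance-order scan by a first-line-index map
-- plus a stable sort of the candidate indicators (objective: alternative decomposition).

def ERROR_INDICATORS : List String :=
  ["FATAL", "Traceback", "Exception", "ERROR", "permission denied", "connection refused",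
   "timeout", "module not found", "no such file", "failed", "unreachable", "refused",
   "killed", "segfault", "oom"]

-- ===== PORT A =====
def get_detected_indicators (error_lines : List (Int × String)) : List String :=
  (error_lines.foldl
    (fun (st : List String × PySem.Set String) p =>
      let lower := PySem.Str.lower p.2
      ERROR_INDICATORS.foldl
        (fun st indicator =>
          if PySem.Str.isIn (PySem.Str.lower indicator) lower && !(PySem.Set.contains st.2 indicator)
          then (st.1 ++ [indicator], PySem.Set.add st.2 indicator)
          else st) st)
    (([], PySem.Set.empty))).1

-- ===== PORT B =====
-- `first[indicator]` in the sort key is total in Source B (every key of `found` is in `first`);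
-- ported as `getD … 0`, exact on all reachable lookups.
def get_detected_indicators_alt (error_lines : List (Int × String)) : List String :=
  let first : PySem.Dict String Int :=
    (PySem.List.enumerate error_lines 0).foldl
      (fun d p =>
        let low := PySem.Str.lower p.2.2
        ERROR_INDICATORS.foldl
          (fun d indicator =>
            if !(d.contains indicator) && PySem.Str.isIn (PySem.Str.lower indicator) low
            then d.insert indicator p.1 else d) d)
      PySem.Dict.empty
  let found := ERROR_INDICATORS.filter (fun indicator => first.contains indicator)
  PySem.List.sorted found (fun indicator => first.getD indicator 0) false

-- ===== PRECONDITION & SPEC =====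
def Spec_get_detected_indicators (error_lines : List (Int × String)) (out : List String) : Prop := out = get_detected_indicators_alt error_lines
instance (error_lines : List (Int × String)) (out : List String) : Decidable (Spec_get_detected_indicators error_lines out) := by unfold Spec_get_detected_indicators; infer_instance

-- ===== CLAIM (what is proved, stated in full; the proofs are below) =====
def Claim_equal_get_detected_indicators : Prop := ∀ (error_lines : List (Int × String)), Dom_get_detected_indicators error_lines → Spec_get_detected_indicators error_lines (get_detected_indicators error_lines)

-- ===== LEMMAS AND PROOFS =====

-- `indicator.lower() in text.lower()`
def hitB (ind text : String) : Bool := PySem.Str.isIn (PySem.Str.lower ind) (PySem.Str.lower text)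

-- index of the first line whose text contains ind
def firstIdx (ind : String) : List (Int × String) → Option Nat
  | [] => none
  | p :: t => if hitB ind p.2 then some 0 else (firstIdx ind t).map (· + 1)

-- canonical result: for each line index k, the indicators first seen at line k, in list order
def canon (ls : List (Int × String)) : List String :=
  (List.range ls.length).flatMap
    (fun k => ERROR_INDICATORS.filter (fun ind => decide (firstIdx ind ls = some k)))

theorem firstIdx_lt {ind : String} {ls : List (Int × String)} {k : Nat}
    (h : firstIdx ind ls = some k) : k < ls.length := by
  induction ls generalizing k with
  | nil => simp [firstIdx] at h
  | cons p t ih =>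
    simp only [firstIdx] at h
    split at h
    · simp_all
      omega
    · cases hf : firstIdx ind t with
      | none => simp [hf] at h
      | some k' =>
        simp [hf] at h
        have := ih hf
        simp [List.length_cons]
        omega

theorem firstIdx_append_single (ind : String) (ls : List (Int × String)) (l : Int × String) :
    firstIdx ind (ls ++ [l]) =
      (match firstIdx ind ls with
        | some k => some k
        | none => if hitB ind l.2 then some ls.length else none) := by
  induction ls with
  | nil => simp [firstIdx]
  | cons p t ih =>
    simp only [List.cons_append, firstIdx, ih]
    cases hf : firstIdx ind t <;> by_cases h : hitB ind p.2 = true <;>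
      simp [h, hf] <;> split <;> simp

theorem flatMap_congr' {α β : Type} {f g : α → List β} (ks : List α)
    (h : ∀ k ∈ ks, f k = g k) : ks.flatMap f = ks.flatMap g := by
  induction ks with
  | nil => rfl
  | cons k t ih =>
    simp only [List.flatMap_cons]
    rw [h k (by simp), ih (fun x hx => h x (by simp [hx]))]

theorem mem_canon {ind : String} {ls : List (Int × String)} (hmem : ind ∈ ERROR_INDICATORS) :
    ind ∈ canon ls ↔ (firstIdx ind ls).isSome := by
  constructor
  · intro h
    simp only [canon, List.mem_flatMap, List.mem_filter] at h
    obtain ⟨k, _, _, hk⟩ := h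
    simp at hk
    simp [hk]
  · intro h
    cases hf : firstIdx ind ls with
    | none => simp [hf] at h
    | some k =>
      simp only [canon, List.mem_flatMap]
      exact ⟨k, by simpa [List.mem_range] using firstIdx_lt hf,
        by simp [List.mem_filter, hmem, hf]⟩

-- A's inner loop over a duplicate-free indicator list appends the new hits to both components
theorem foldA_inner (c : String → Bool) (is : List String) (hn : is.Nodup)
    (acc s : List String) :
    is.foldl
      (fun (st : List String × PySem.Set String) ind =>
        if c ind && !(PySem.Set.contains st.2 ind)
        then (st.1 ++ [ind], PySem.Set.add st.2 ind) else st) (acc, s)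
    = (acc ++ is.filter (fun ind => c ind && !(PySem.Set.contains s ind)),
       s ++ is.filter (fun ind => c ind && !(PySem.Set.contains s ind))) := by
  induction is generalizing acc s with
  | nil => simp
  | cons i t ih =>
    have hni : i ∉ t := (List.nodup_cons.mp hn).1
    have hnt : t.Nodup := (List.nodup_cons.mp hn).2
    by_cases hc : (c i && !(PySem.Set.contains s i)) = true
    · have hci : c i = true := (by simpa using hc : c i = true ∧ ¬ PySem.Set.contains s i = true).1
      have hsi : i ∉ s := by
        simpa using (by simpa using hc : c i = true ∧ ¬ PySem.Set.contains s i = true).2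
      have hcon : PySem.Set.contains s i = false := by simpa using hsi
      have hadd : PySem.Set.add s i = s ++ [i] := by
        simp [PySem.Set.add, hsi]
      have hfil : t.filter (fun ind => c ind && !(PySem.Set.contains (s ++ [i]) ind))
          = t.filter (fun ind => c ind && !(PySem.Set.contains s ind)) := by
        apply List.filter_congr
        intro x hx
        have hxi : x ≠ i := fun h => hni (h ▸ hx)
        simp [List.contains_eq_mem, hxi]
      rw [List.foldl_cons]
      rw [if_pos hc, hadd, ih hnt (acc ++ [i]) (s ++ [i]), hfil]
      simp [List.filter_cons, hci, hsi, List.append_assoc]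
    · have hcf : (c i && !(PySem.Set.contains s i)) = false := by
        cases h : (c i && !(PySem.Set.contains s i)) with
        | false => rfl
        | true => exact absurd h hc
      rw [List.foldl_cons, if_neg hc, ih hnt acc s]
      simp [List.filter_cons, hcf]
      intro h
      have h2 : PySem.Set.contains s i = true := by
        cases hcontains : PySem.Set.contains s i with
        | true => rfl
        | false => rw [h, hcontains] at hcf; simp at hcf
      simpa using h2

theorem nodup_indicators : ERROR_INDICATORS.Nodup := by decide

-- A's outer loop, started on the diagonal, computes canon in both components
theorem foldA_eq_canon (ls : List (Int × String)) :
    ls.foldl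
      (fun (st : List String × PySem.Set String) p =>
        let lower := PySem.Str.lower p.2
        ERROR_INDICATORS.foldl
          (fun st indicator =>
            if PySem.Str.isIn (PySem.Str.lower indicator) lower && !(PySem.Set.contains st.2 indicator)
            then (st.1 ++ [indicator], PySem.Set.add st.2 indicator)
            else st) st)
      (([], PySem.Set.empty)) = (canon ls, canon ls) := by
  induction ls using List.reverseRecOn with
  | nil => simp [canon]
  | append_singleton ls l ih =>
    rw [List.foldl_append, ih]
    simp only [List.foldl_cons, List.foldl_nil]
    rw [foldA_inner (fun ind => PySem.Str.isIn (PySem.Str.lower ind) (PySem.Str.lower l.2))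
      ERROR_INDICATORS nodup_indicators (canon ls) (canon ls)]
    have hnew : ERROR_INDICATORS.filter
          (fun ind => PySem.Str.isIn (PySem.Str.lower ind) (PySem.Str.lower l.2)
            && !(PySem.Set.contains (canon ls) ind))
        = ERROR_INDICATORS.filter (fun ind => decide (firstIdx ind (ls ++ [l]) = some ls.length)) := by
      apply List.filter_congr
      intro ind hmem
      rw [show PySem.Str.isIn (PySem.Str.lower ind) (PySem.Str.lower l.2) = hitB ind l.2 from rfl]
      rw [firstIdx_append_single]
      cases hf : firstIdx ind ls with
      | some k =>
        have hk := firstIdx_lt hf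
        have hin : ind ∈ canon ls := (mem_canon hmem).mpr (by simp [hf])
        have hcon : PySem.Set.contains (canon ls) ind = true := by
          simp [List.contains_eq_mem, hin]
        have hne : k ≠ ls.length := by omega
        simp [hcon, hne]
        intro _
        exact hin
      | none =>
        have hout : ind ∉ canon ls := fun h => by
          have := (mem_canon hmem).mp h; simp [hf] at this
        have hcon : PySem.Set.contains (canon ls) ind = false := by
          simp [List.contains_eq_mem, hout]
        simp only [hcon, Bool.not_false, Bool.and_true]
        by_cases hh : hitB ind l.2 = true <;> simp [hh, hcon]
    have hcanon : canon (ls ++ [l]) = canon ls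
        ++ ERROR_INDICATORS.filter (fun ind => decide (firstIdx ind (ls ++ [l]) = some ls.length)) := by
      simp only [canon, List.length_append, List.length_cons, List.length_nil, List.range_succ,
        List.flatMap_append, List.flatMap_cons, List.flatMap_nil, List.append_nil]
      congr 1
      apply flatMap_congr'
      intro k hk
      simp only [List.mem_range] at hk
      apply List.filter_congr
      intro ind _
      rw [firstIdx_append_single]
      cases hf : firstIdx ind ls with
      | some k' => simp
      | none =>
        by_cases hh : hitB ind l.2 = true
        · have hne : ls.length ≠ k := by omega
          simp [hh, hne]
        · simp [hh]
    rw [hcanon, hnew]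

-- ========= B side =========

-- B's dict-building loop, named for the proofs (definitionally the `first` of the port)
def dictFold (ls : List (Int × String)) : PySem.Dict String Int :=
  (PySem.List.enumerate ls 0).foldl
    (fun d p =>
      let low := PySem.Str.lower p.2.2
      ERROR_INDICATORS.foldl
        (fun d indicator =>
          if !(d.contains indicator) && PySem.Str.isIn (PySem.Str.lower indicator) low
          then d.insert indicator p.1 else d) d)
    PySem.Dict.empty

theorem foldB_inner (c : String → Bool) (v : Int) (is : List String)
    (d : PySem.Dict String Int) (x : String) :
    (is.foldl (fun d ind => if !(d.contains ind) && c ind then d.insert ind v else d) d).get? x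
    = if x ∈ is ∧ c x = true ∧ d.get? x = none then some v else d.get? x := by
  induction is generalizing d with
  | nil => simp
  | cons i t ih =>
    simp only [List.foldl_cons]
    by_cases hc : (!(d.contains i) && c i) = true
    · rw [if_pos hc, ih]
      rcases (by simpa using hc : ¬ d.contains i = true ∧ c i = true) with ⟨h1, h2⟩
      have hdi : d.get? i = none := by
        have := PySem.Dict.contains_eq_isSome_get? d i
        rw [Bool.not_eq_true] at h1
        rw [h1] at this
        simpa using (Option.isSome_eq_false_iff.mp this.symm)
      by_cases hxi : x = i
      · subst hxi
        simp [PySem.Dict.get?_insert_self, hdi, h2]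
      · rw [PySem.Dict.get?_insert_of_ne d v hxi]
        simp [hxi]
    · rw [if_neg hc, ih]
      by_cases hxi : x = i
      · subst hxi
        simp only [Bool.and_eq_true, Bool.not_eq_true'] at hc
        by_cases hcx : c x = true
        · by_cases hdx : d.get? x = none
          · exfalso
            apply hc
            constructor
            · rw [PySem.Dict.contains_eq_isSome_get?, hdx]; rfl
            · exact hcx
          · simp [hdx]
        · simp [hcx]
      · simp [hxi]

theorem foldB_step (p : Int × (Int × String)) (d : PySem.Dict String Int) (x : String) :
    (ERROR_INDICATORS.foldl
      (fun d indicator =>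
        if !(d.contains indicator) && PySem.Str.isIn (PySem.Str.lower indicator) (PySem.Str.lower p.2.2)
        then d.insert indicator p.1 else d) d).get? x
    = if x ∈ ERROR_INDICATORS ∧ hitB x p.2.2 = true ∧ d.get? x = none
      then some p.1 else d.get? x := by
  rw [foldB_inner (fun ind => PySem.Str.isIn (PySem.Str.lower ind) (PySem.Str.lower p.2.2))
    p.1 ERROR_INDICATORS d x]
  rfl

theorem dictFold_get? (ls : List (Int × String)) (x : String) :
    (dictFold ls).get? x
    = if x ∈ ERROR_INDICATORS then (firstIdx x ls).map (fun k => (k : Int)) else none := by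
  induction ls using List.reverseRecOn with
  | nil =>
    simp only [dictFold, PySem.List.enumerate_nil, List.foldl_nil]
    by_cases hmem : x ∈ ERROR_INDICATORS <;>
      simp [hmem, firstIdx, PySem.Dict.empty, PySem.Dict.get?]
  | append_singleton ls l ih =>
    have henum : PySem.List.enumerate (ls ++ [l]) 0
        = PySem.List.enumerate ls 0 ++ [((ls.length : Int), l)] := by
      rw [PySem.List.enumerate_append]
      simp [PySem.List.enumerate_cons, PySem.List.enumerate_nil]
    simp only [dictFold] at ih ⊢
    rw [henum, List.foldl_append, List.foldl_cons, List.foldl_nil]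
    rw [foldB_step ((ls.length : Int), l) _ x]
    rw [ih, firstIdx_append_single]
    by_cases hmem : x ∈ ERROR_INDICATORS
    · simp only [hmem, if_true]
      cases hf : firstIdx x ls with
      | some k => simp
      | none =>
        by_cases hh : hitB x l.2 = true <;> simp [hh]
    · simp [hmem]

-- ===== the stable sort as a grouping by key =====

theorem insertBy_skip {α : Type} (before : α → α → Bool) (x : α) (A B : List α)
    (hA : ∀ y ∈ A, before x y = false) :
    PySem.List.insertBy before x (A ++ B) = A ++ PySem.List.insertBy before x B := by
  induction A with
  | nil => simp
  | cons a t ih =>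
    have ha : before x a = false := hA a (by simp)
    simp only [List.cons_append, PySem.List.insertBy, ha]
    simp [ih (fun y hy => hA y (by simp [hy]))]

theorem insertBy_front {α : Type} (before : α → α → Bool) (x : α) (B : List α)
    (hB : ∀ y ∈ B, before x y = true) :
    PySem.List.insertBy before x B = x :: B := by
  cases B with
  | nil => rfl
  | cons b t => simp [PySem.List.insertBy, hB b (by simp)]

theorem insertBy_flatMap {α : Type} (key : α → Int) (G : Int → List α)
    (hG : ∀ k, ∀ y ∈ G k, key y = k) (ks : List Int) (hks : ks.Pairwise (· < ·))
    (x : α) (hk : key x ∈ ks) :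
    PySem.List.insertBy (fun a b => decide (key a < key b)) x (ks.flatMap G)
    = ks.flatMap (fun j => G j ++ if j = key x then [x] else []) := by
  induction ks with
  | nil => simp at hk
  | cons j t ih =>
    rcases List.pairwise_cons.mp hks with ⟨hjt, hpt⟩
    by_cases hjk : j = key x
    · subst hjk
      simp only [List.flatMap_cons]
      rw [insertBy_skip _ x (G (key x)) (t.flatMap G)
        (fun y hy => by simp [hG _ y hy])]
      rw [insertBy_front _ x (t.flatMap G)
        (fun y hy => by
          rcases List.mem_flatMap.mp hy with ⟨m, hm, hym⟩
          simp [hG m y hym]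
          exact hjt m hm)]
      have : t.flatMap (fun j => G j ++ if j = key x then [x] else []) = t.flatMap G := by
        apply flatMap_congr'
        intro m hm
        have : m ≠ key x := fun h => by
          have := hjt m hm; omega
        simp [this]
      rw [this]
      simp
    · have hkt : key x ∈ t := by
        rcases List.mem_cons.mp hk with h | h
        · exact absurd h.symm hjk
        · exact h
      simp only [List.flatMap_cons]
      rw [insertBy_skip _ x (G j) _
        (fun y hy => by
          have hjx : j < key x := hjt _ hkt
          simp [hG j y hy]
          omega)]
      rw [ih hpt hkt]
      have : j ≠ key x := hjk
      simp [this]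

theorem sorted_eq_flatMap {α : Type} (key : α → Int) (ks : List Int)
    (hks : ks.Pairwise (· < ·)) (xs : List α) (h : ∀ x ∈ xs, key x ∈ ks) :
    PySem.List.sorted xs key false
    = ks.flatMap (fun k => xs.filter (fun x => decide (key x = k))) := by
  rw [PySem.List.sorted_eq_foldl_insertBy]
  induction xs using List.reverseRecOn with
  | nil => simp
  | append_singleton xs x ih =>
    rw [List.foldl_append, List.foldl_cons, List.foldl_nil]
    rw [ih (fun y hy => h y (by simp [hy]))]
    rw [insertBy_flatMap key (fun k => xs.filter (fun x => decide (key x = k)))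
      (fun k y hy => by simp at hy; exact hy.2) ks hks x (h x (by simp))]
    apply flatMap_congr'
    intro k _
    rw [List.filter_append]
    congr 1
    by_cases hkx : key x = k
    · simp [hkx]
    · have hkx' : k ≠ key x := fun h => hkx h.symm
      simp [hkx, hkx']

theorem altB_eq_canon (ls : List (Int × String)) :
    get_detected_indicators_alt ls = canon ls := by
  have hport : get_detected_indicators_alt ls
      = PySem.List.sorted
          (ERROR_INDICATORS.filter (fun i => (dictFold ls).contains i))
          (fun i => (dictFold ls).getD i 0) false := rfl
  rw [hport]
  have hfound : ERROR_INDICATORS.filter (fun i => (dictFold ls).contains i)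
      = ERROR_INDICATORS.filter (fun i => (firstIdx i ls).isSome) := by
    apply List.filter_congr
    intro i hi
    rw [PySem.Dict.contains_eq_isSome_get?, dictFold_get?, if_pos hi]
    cases firstIdx i ls <;> rfl
  rw [hfound]
  have hkey : ∀ i ∈ ERROR_INDICATORS.filter (fun i => (firstIdx i ls).isSome),
      ∀ k : Nat, firstIdx i ls = some k → (dictFold ls).getD i 0 = (k : Int) := by
    intro i hi k hk
    have hmem : i ∈ ERROR_INDICATORS := (List.mem_filter.mp hi).1
    simp only [PySem.Dict.getD]
    rw [dictFold_get?, if_pos hmem, hk]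
    rfl
  set found := ERROR_INDICATORS.filter (fun i => (firstIdx i ls).isSome) with hfdef
  have hks : ((List.range ls.length).map Int.ofNat).Pairwise (· < ·) := by
    rw [List.pairwise_map]
    exact (List.pairwise_lt_range).imp (fun h => Int.ofNat_lt.mpr h)
  rw [sorted_eq_flatMap _ ((List.range ls.length).map Int.ofNat) hks found
    (by
      intro x hx
      have hs := (List.mem_filter.mp hx).2
      simp only [Option.isSome_iff_exists] at hs
      rcases hs with ⟨k, hk⟩
      rw [hkey x hx k hk]
      exact List.mem_map.mpr ⟨k, by simpa [List.mem_range] using firstIdx_lt hk, rfl⟩)]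
  rw [List.flatMap_map]
  apply flatMap_congr'
  intro k hk
  rw [hfdef, List.filter_filter]
  apply List.filter_congr
  intro i hi
  cases hf : firstIdx i ls with
  | none => simp [hf]
  | some k' =>
    have : (dictFold ls).getD i 0 = (k' : Int) :=
      hkey i (List.mem_filter.mpr ⟨hi, by simp [hf]⟩) k' hf
    simp [this]

-- ===== VERDICT (by name: the statement is the Claim_ definition above) =====
theorem get_detected_indicators_spec : Claim_equal_get_detected_indicators := by
  intro error_lines _
  show get_detected_indicators error_lines = get_detected_indicators_alt error_lines
  rw [altB_eq_canon]
  unfold get_detected_indicators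
  rw [foldA_eq_canon]
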